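-- pv_equiv track=rewrite | github.com/furrepanther/jcodemunch-mcp | src/jcodemunch_mcp/encoding/format.py | _iter_kv_tokens
-- ===== SOURCE A (Python) =====
-- from typing import Any, Iterable
--
-- def _iter_kv_tokens(line: str) -> Iterable[tuple[str, str]]:
--     i = 0
--     n = len(line)
--     while i < n:
--         while i < n and line[i].isspace():
--             i += 1
--         if i >= n:
--             break
--         j = line.find("=", i)
--         if j < 0:
--             break
--         key = line[i:j]
--         i = j + 1
--         if i < n and line[i] == '"':
--             i += 1
--             buf: list[str] = []
--             while i < n:
--                 ch = line[i]
--                 if ch == '"':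
--                     if i + 1 < n and line[i + 1] == '"':
--                         buf.append('"')
--                         i += 2
--                         continue
--                     i += 1
--                     break
--                 buf.append(ch)
--                 i += 1
--             yield key, "".join(buf)
--         else:
--             k2 = i
--             while i < n and not line[i].isspace():
--                 i += 1
--             yield key, line[k2:i]
-- ===== SOURCE B (Python) =====
-- from typing import Any, Iterable
--
-- def _iter_kv_tokens(line: str) -> Iterable[tuple[str, str]]:
--     # Consume the remainder string with str.partition instead of walking indices.
--     rest = line
--     while True:
--         key, sep, rest = rest.lstrip().partition("=")
--         if not sep:
--             return
--         if rest.startswith('"'):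
--             rest = rest[1:]
--             pieces: list[str] = []
--             while True:
--                 chunk, q, rest = rest.partition('"')
--                 pieces.append(chunk)
--                 if not q or not rest.startswith('"'):
--                     break
--                 pieces.append('"')
--                 rest = rest[1:]
--             yield key, "".join(pieces)
--         else:
--             k = next((p for p, c in enumerate(rest) if c.isspace()), len(rest))
--             yield key, rest[:k]
--             rest = rest[k:]
-- ===== Notes on version B (the rewrite author's own statement) =====
-- stated objective: idiomatic
-- what changed: Replaces the manual index walk (i/n with nested while loops and per-character stepping) by repeatedly consuming the remainder string with lstrip/partition: the key is split off with str.partition('='), quoted values are assembled by partitioning at '"' chunk-wise, unquoted values by a first-whitespace split.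
import Mathlib
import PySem

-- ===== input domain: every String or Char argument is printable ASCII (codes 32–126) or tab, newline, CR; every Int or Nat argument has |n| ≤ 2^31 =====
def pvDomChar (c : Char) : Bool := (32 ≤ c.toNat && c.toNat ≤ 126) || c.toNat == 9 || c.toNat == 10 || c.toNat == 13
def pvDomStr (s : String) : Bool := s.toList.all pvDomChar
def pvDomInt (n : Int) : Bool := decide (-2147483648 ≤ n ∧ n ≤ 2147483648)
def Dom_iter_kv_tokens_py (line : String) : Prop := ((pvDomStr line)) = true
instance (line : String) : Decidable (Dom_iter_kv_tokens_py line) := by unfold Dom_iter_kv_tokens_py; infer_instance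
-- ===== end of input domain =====

-- B replaces A's manual index walk by repeatedly consuming the remainder string with
-- str.partition / lstrip; same return value, a different decomposition (objective: idiomatic).

-- ===== PORT A =====
-- A walks the string by index i; every line[i] below is guarded by i < n, so List.getD is exact.
-- Python's local n = len(line) is written out as cs.length.

-- 'while i < n and line[i].isspace(): i += 1'
theorem pvDecTwo (n i : Nat) (h : i < n) : n - (i + 2) < n - i := by omega

def pvSkipA (cs : List Char) (n i : Nat) : Nat :=
  if h : i < n ∧ PySem.Chars.isspace (cs.getD i ' ') = true then pvSkipA cs n (i + 1) else i
termination_by n - i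
decreasing_by exact Nat.sub_succ_lt_self _ _ h.1

-- inner 'while i < n: …' of the quoted-value branch; returns (buf, i)
def pvQuotedA (cs : List Char) (n i : Nat) (buf : List Char) : List Char × Nat :=
  if h : i < n then
    let ch := cs.getD i ' '
    if ch = '"' then
      if i + 1 < n ∧ cs.getD (i + 1) ' ' = '"' then pvQuotedA cs n (i + 2) (buf ++ ['"'])
      else (buf, i + 1)
    else pvQuotedA cs n (i + 1) (buf ++ [ch])
  else (buf, i)
termination_by n - i
decreasing_by all_goals first
  | exact pvDecTwo _ _ h
  | exact Nat.sub_succ_lt_self _ _ h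

-- 'while i < n and not line[i].isspace(): i += 1'
def pvUnqA (cs : List Char) (n i : Nat) : Nat :=
  if h : i < n ∧ ¬ (PySem.Chars.isspace (cs.getD i ' ') = true) then pvUnqA cs n (i + 1) else i
termination_by n - i
decreasing_by exact Nat.sub_succ_lt_self _ _ h.1

-- facts the recursion of pvMainA needs (cited in its decreasing_by)
theorem pvSkipA_ge (cs : List Char) (n i : Nat) : i ≤ pvSkipA cs n i := by
  fun_induction pvSkipA <;> omega

theorem pvQuotedA_ge (cs : List Char) (n i : Nat) (buf : List Char) :
    i ≤ (pvQuotedA cs n i buf).2 := by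
  fun_induction pvQuotedA <;> simp_all <;> omega

theorem pvUnqA_ge (cs : List Char) (n i : Nat) : i ≤ pvUnqA cs n i := by
  fun_induction pvUnqA <;> omega

theorem pvFindFrom_ge (cs : List Char) (i : Nat) (hi : i ≤ cs.length)
    (hj : ¬ PySem.Chars.findFrom cs ['='] (↑i) none < 0) :
    (↑i : Int) ≤ PySem.Chars.findFrom cs ['='] (↑i) none := by
  have hf := PySem.Chars.neg_one_le_find (cs.drop i) ['=']
  rw [PySem.Chars.findFrom_natCast cs ['='] i hi] at *
  split at hj
  · omega
  · split
    · omega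
    · omega

theorem pvMainA_dec1 (cs : List Char) (i : Nat)
    (h1 : pvSkipA cs cs.length i < cs.length)
    (hj : ¬ PySem.Chars.findFrom cs ['='] (↑(pvSkipA cs cs.length i)) none < 0) :
    cs.length - (pvQuotedA cs cs.length
      ((PySem.Chars.findFrom cs ['='] (↑(pvSkipA cs cs.length i)) none).toNat + 1 + 1) []).2
      < cs.length - i := by
  have h2 := pvSkipA_ge cs cs.length i
  have h3 := pvFindFrom_ge cs (pvSkipA cs cs.length i) (by omega) hj
  have h4 := pvQuotedA_ge cs cs.length
    ((PySem.Chars.findFrom cs ['='] (↑(pvSkipA cs cs.length i)) none).toNat + 1 + 1) []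
  omega

theorem pvMainA_dec2 (cs : List Char) (i : Nat)
    (h1 : pvSkipA cs cs.length i < cs.length)
    (hj : ¬ PySem.Chars.findFrom cs ['='] (↑(pvSkipA cs cs.length i)) none < 0) :
    cs.length - pvUnqA cs cs.length
      ((PySem.Chars.findFrom cs ['='] (↑(pvSkipA cs cs.length i)) none).toNat + 1)
      < cs.length - i := by
  have h2 := pvSkipA_ge cs cs.length i
  have h3 := pvFindFrom_ge cs (pvSkipA cs cs.length i) (by omega) hj
  have h4 := pvUnqA_ge cs cs.length
    ((PySem.Chars.findFrom cs ['='] (↑(pvSkipA cs cs.length i)) none).toNat + 1)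
  omega

-- the outer 'while i < n' loop; the generator's yields are accumulated in acc
def pvMainA (cs : List Char) (i : Nat) (acc : List (String × String)) : List (String × String) :=
  let i1 := pvSkipA cs cs.length i
  if h1 : i1 < cs.length then
    -- j = line.find("=", i)
    let j := PySem.Chars.findFrom cs ['='] (↑i1) none
    if hj : j < 0 then acc
    else
      let key := PySem.List.slice cs (some ↑i1) (some j)   -- line[i:j]
      let i2 := j.toNat + 1
      if i2 < cs.length ∧ cs.getD i2 ' ' = '"' then
        let r := pvQuotedA cs cs.length (i2 + 1) []
        pvMainA cs r.2 (acc ++ [(String.ofList key, String.ofList r.1)])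
      else
        let i3 := pvUnqA cs cs.length i2
        pvMainA cs i3 (acc ++ [(String.ofList key, String.ofList (PySem.List.slice cs (some ↑i2) (some ↑i3)))])
  else acc
termination_by cs.length - i
decreasing_by
  · exact pvMainA_dec1 cs i (by assumption) (by assumption)
  · exact pvMainA_dec2 cs i (by assumption) (by assumption)

def iter_kv_tokens_py (line : String) : List (String × String) :=
  pvMainA line.toList 0 []

-- ===== PORT B =====
-- hand port of str.partition(sep) for a one-character separator: (head, found?, tail)
def pvPartB (sep : Char) (l : List Char) : List Char × Bool × List Char :=
  match l with
  | [] => ([], false, [])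
  | c :: r =>
    if c = sep then ([], true, r)
    else
      let p := pvPartB sep r
      (c :: p.1, p.2.1, p.2.2)

theorem pvPartB_len (sep : Char) (l : List Char) (h : (pvPartB sep l).2.1 = true) :
    (pvPartB sep l).2.2.length < l.length := by
  induction l with
  | nil => simp [pvPartB] at h
  | cons c r ih =>
    by_cases hc : c = sep
    · simp [pvPartB, hc]
    · simp only [pvPartB, if_neg hc] at h ⊢
      have := ih h
      simpa using Nat.lt_succ_of_lt this

theorem pvQuotB_dec (rest : List Char) (h : (pvPartB '"' rest).2.1 = true) :
    (pvPartB '"' rest).2.2.tail.length < rest.length := by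
  have h1 := pvPartB_len '"' rest h
  have h2 : (pvPartB '"' rest).2.2.tail.length ≤ (pvPartB '"' rest).2.2.length := by
    cases (pvPartB '"' rest).2.2 <;> simp
  omega

-- inner 'while True' of the quoted branch: repeatedly partition at '"'; returns (value, rest)
def pvQuotB (rest : List Char) (pieces : List (List Char)) : List Char × List Char :=
  let p := pvPartB '"' rest
  let pieces' := pieces ++ [p.1]
  if ¬ p.2.1 = true ∨ ¬ PySem.Chars.startswith p.2.2 ['"'] = true then
    (pieces'.flatten, p.2.2)                         -- "".join(pieces)
  else
    pvQuotB p.2.2.tail (pieces' ++ [['"']])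
termination_by rest.length
decreasing_by
  rename_i h
  exact pvQuotB_dec rest (by rw [not_or, not_not] at h; exact h.1)

theorem pvPartB_len_le (sep : Char) (l : List Char) :
    (pvPartB sep l).2.2.length ≤ l.length := by
  induction l with
  | nil => simp [pvPartB]
  | cons c r ih => by_cases hc : c = sep <;> simp [pvPartB, hc] <;> omega

theorem pvQuotB_len (rest : List Char) (pieces : List (List Char)) :
    (pvQuotB rest pieces).2.length ≤ rest.length := by
  fun_induction pvQuotB with
  | case1 rest pieces p pieces' h =>
    simpa using pvPartB_len_le '"' rest
  | case2 rest pieces p pieces' h ih =>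
    rw [not_or, not_not] at h
    have h1 := pvPartB_len '"' rest h.1
    have h2 : (pvPartB '"' rest).2.2.tail.length ≤ (pvPartB '"' rest).2.2.length := by
      cases (pvPartB '"' rest).2.2 <;> simp
    simp only [show p = pvPartB '"' rest from rfl] at ih ⊢
    omega

theorem pvMainB_dec1 (rest : List Char)
    (h : ¬ (pvPartB '=' (PySem.Chars.lstrip rest)).2.1 = false) :
    (pvQuotB (pvPartB '=' (PySem.Chars.lstrip rest)).2.2.tail []).2.length < rest.length := by
  have hls := List.length_dropWhile_le PySem.Chars.isspace rest
  have h1 := pvPartB_len '=' (PySem.Chars.lstrip rest) (by simpa using h)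
  have h2 := pvQuotB_len (pvPartB '=' (PySem.Chars.lstrip rest)).2.2.tail []
  have h3 : (pvPartB '=' (PySem.Chars.lstrip rest)).2.2.tail.length
      ≤ (pvPartB '=' (PySem.Chars.lstrip rest)).2.2.length := by
    cases (pvPartB '=' (PySem.Chars.lstrip rest)).2.2 <;> simp
  simp only [PySem.Chars.lstrip] at *
  omega

theorem pvMainB_dec2 (rest : List Char)
    (h : ¬ (pvPartB '=' (PySem.Chars.lstrip rest)).2.1 = false) :
    ((pvPartB '=' (PySem.Chars.lstrip rest)).2.2.dropWhile (fun c => !PySem.Chars.isspace c)).length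
      < rest.length := by
  have hls := List.length_dropWhile_le PySem.Chars.isspace rest
  have h1 := pvPartB_len '=' (PySem.Chars.lstrip rest) (by simpa using h)
  have h2 := List.length_dropWhile_le (fun c => !PySem.Chars.isspace c)
    (pvPartB '=' (PySem.Chars.lstrip rest)).2.2
  simp only [PySem.Chars.lstrip] at *
  omega

-- the outer 'while True' loop of B (the 'yield's accumulated in acc)
def pvMainB (rest : List Char) (acc : List (String × String)) : List (String × String) :=
  let p := pvPartB '=' (PySem.Chars.lstrip rest)     -- rest.lstrip().partition("=")
  if p.2.1 = false then acc
  else if PySem.Chars.startswith p.2.2 ['"'] = true then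
    let q := pvQuotB p.2.2.tail []
    pvMainB q.2 (acc ++ [(String.ofList p.1, String.ofList q.1)])
  else
    -- rest[:k] / rest[k:] with k = the first whitespace index are takeWhile/dropWhile
    let v := p.2.2.takeWhile (fun c => !PySem.Chars.isspace c)
    pvMainB (p.2.2.dropWhile (fun c => !PySem.Chars.isspace c)) (acc ++ [(String.ofList p.1, String.ofList v)])
termination_by rest.length
decreasing_by
  · rename_i h _
    exact pvMainB_dec1 rest h
  · rename_i h _
    exact pvMainB_dec2 rest h

def iter_kv_tokens_py_alt (line : String) : List (String × String) :=
  pvMainB line.toList []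

-- ===== PRECONDITION & SPEC =====
def Spec_iter_kv_tokens_py (line : String) (out : List (String × String)) : Prop := out = iter_kv_tokens_py_alt line
instance (line : String) (out : List (String × String)) : Decidable (Spec_iter_kv_tokens_py line out) := by unfold Spec_iter_kv_tokens_py; infer_instance

-- ===== CLAIM (what is proved, stated in full; the proofs are below) =====
def Claim_equal_iter_kv_tokens_py : Prop := ∀ (line : String), Dom_iter_kv_tokens_py line → Spec_iter_kv_tokens_py line (iter_kv_tokens_py line)

-- ===== LEMMAS AND PROOFS =====

-- the value and the rest-of-input of one quoted token, as structural functions (proof-only)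
def pvQVal : List Char → List Char
  | [] => []
  | c :: r =>
    if c = '"' then (if r.head? = some '"' then '"' :: pvQVal r.tail else [])
    else c :: pvQVal r
termination_by l => l.length
decreasing_by all_goals simp [List.length_tail]

def pvQRest : List Char → List Char
  | [] => []
  | c :: r =>
    if c = '"' then (if r.head? = some '"' then pvQRest r.tail else r)
    else pvQRest r
termination_by l => l.length
decreasing_by all_goals simp [List.length_tail]

theorem pv_dropWhile_eq_drop {α : Type} (p : α → Bool) (l : List α) :
    l.dropWhile p = l.drop (l.takeWhile p).length := by
  induction l with
  | nil => simp
  | cons c r ih => by_cases h : p c <;> simp [h, ih]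

theorem pv_take_takeWhile {α : Type} (p : α → Bool) (l : List α) :
    l.take (l.takeWhile p).length = l.takeWhile p := by
  induction l with
  | nil => simp
  | cons c r ih => by_cases h : p c <;> simp [h, ih]

theorem pvPartB_eq (sep : Char) (l : List Char) :
    pvPartB sep l = (l.takeWhile (fun c => decide (c ≠ sep)), decide (sep ∈ l),
      (l.dropWhile (fun c => decide (c ≠ sep))).tail) := by
  induction l with
  | nil => simp [pvPartB]
  | cons c r ih =>
    by_cases h : c = sep
    · simp [pvPartB, h]
    · simp [pvPartB, h, ih, Ne.symm h]

theorem pv_dropWhile_mem (sep : Char) (l : List Char) (h : sep ∈ l) :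
    ∃ r, l.dropWhile (fun c => decide (c ≠ sep)) = sep :: r := by
  induction l with
  | nil => simp at h
  | cons c r ih =>
    by_cases hc : c = sep
    · subst hc; exact ⟨r, by simp⟩
    · rcases List.mem_cons.mp h with h1 | h1
      · exact absurd h1.symm hc
      · simpa [hc] using ih h1

theorem pv_singleton_prefix (c : Char) (l : List Char) : [c] <+: l ↔ l.head? = some c := by
  cases l <;> simp [List.cons_prefix_iff, eq_comm]

theorem pv_find_eq_of (l sub : List Char) (j : Nat) (h1 : sub <+: l.drop j)
    (h2 : ∀ k < j, ¬ sub <+: l.drop k) : PySem.Chars.find l sub = (j : Int) := by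
  have hin : PySem.Chars.isIn sub l = true :=
    (PySem.Chars.exists_prefix_drop_iff_isIn sub l).mp ⟨j, h1⟩
  have hnn : 0 ≤ PySem.Chars.find l sub :=
    (PySem.Chars.find_nonneg_iff l sub).mpr ((PySem.Chars.isIn_iff_infix sub l).mp hin)
  obtain ⟨hp, hmin⟩ := PySem.Chars.find_spec hnn
  have hje : (PySem.Chars.find l sub).toNat = j := by
    rcases Nat.lt_trichotomy (PySem.Chars.find l sub).toNat j with h | h | h
    · exact absurd hp (h2 _ h)
    · exact h
    · exact absurd h1 (hmin _ h)
  omega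

theorem pv_find_char (c0 : Char) (l : List Char) :
    PySem.Chars.find l [c0] =
      if c0 ∈ l then ((l.takeWhile (fun c => decide (c ≠ c0))).length : Int) else -1 := by
  by_cases h : c0 ∈ l
  · rw [if_pos h]
    apply pv_find_eq_of
    · rw [← pv_dropWhile_eq_drop, pv_singleton_prefix]
      obtain ⟨r, hr⟩ := pv_dropWhile_mem c0 l h
      rw [hr]; rfl
    · intro k hk hpre
      rw [pv_singleton_prefix, List.head?_drop] at hpre
      obtain ⟨hlt, hval⟩ := List.getElem?_eq_some_iff.mp hpre
      have hmem : l[k] ∈ l.takeWhile (fun c => decide (c ≠ c0)) := by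
        rw [← pv_take_takeWhile (fun c => decide (c ≠ c0)) l]
        have hk' : k < (l.take (l.takeWhile (fun c => decide (c ≠ c0))).length).length := by
          have hle := (List.takeWhile_sublist (p := fun c => decide (c ≠ c0)) (l := l)).length_le
          rw [List.length_take]; omega
        have := List.getElem_take (xs := l) (h := hk')
        rw [← this]
        exact List.getElem_mem hk'
      have := List.mem_takeWhile_imp hmem
      simp [hval] at this
  · rw [if_neg h, PySem.Chars.find_eq_neg_one_iff]
    intro hinf
    exact h (hinf.subset (by simp))

theorem pv_skip_eq (cs : List Char) (i : Nat) :
    pvSkipA cs cs.length i = i + ((cs.drop i).takeWhile PySem.Chars.isspace).length := by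
  fun_induction pvSkipA cs cs.length i with
  | case1 i h ih =>
    rw [ih, List.drop_eq_getElem_cons h.1]
    rw [List.getD_eq_getElem cs ' ' h.1] at h
    rw [List.takeWhile_cons, if_pos h.2]
    simp only [List.length_cons]
    omega
  | case2 i h =>
    by_cases hlt : i < cs.length
    · have hsp : ¬ PySem.Chars.isspace cs[i] = true := by
        rw [List.getD_eq_getElem cs ' ' hlt] at h
        exact fun hh => h ⟨hlt, hh⟩
      rw [List.drop_eq_getElem_cons hlt, List.takeWhile_cons,
        if_neg (by simpa using hsp)]
      simp
    · rw [List.drop_eq_nil_iff.mpr (by omega)]; simp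

theorem pv_unq_eq (cs : List Char) (i : Nat) :
    pvUnqA cs cs.length i = i + ((cs.drop i).takeWhile (fun c => !PySem.Chars.isspace c)).length := by
  fun_induction pvUnqA cs cs.length i with
  | case1 i h ih =>
    rw [ih, List.drop_eq_getElem_cons h.1]
    rw [List.getD_eq_getElem cs ' ' h.1] at h
    rw [List.takeWhile_cons, if_pos (by simpa using h.2)]
    simp only [List.length_cons]
    omega
  | case2 i h =>
    by_cases hlt : i < cs.length
    · have hsp : PySem.Chars.isspace cs[i] = true := by
        rw [List.getD_eq_getElem cs ' ' hlt] at h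
        by_contra hc
        exact h ⟨hlt, hc⟩
      rw [List.drop_eq_getElem_cons hlt, List.takeWhile_cons,
        if_neg (by simp [hsp])]
      simp
    · rw [List.drop_eq_nil_iff.mpr (by omega)]; simp

theorem pv_quotedA_eq (cs : List Char) (i : Nat) (buf : List Char) :
    (pvQuotedA cs cs.length i buf).1 = buf ++ pvQVal (cs.drop i) ∧
      cs.drop (pvQuotedA cs cs.length i buf).2 = pvQRest (cs.drop i) := by
  fun_induction pvQuotedA cs cs.length i buf with
  | case1 i buf h1 ch h2 h3 ih =>
    -- line[i] = '"' and line[i+1] = '"'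
    have h2' : cs[i] = '"' := by
      have h0 : cs.getD i ' ' = '"' := h2
      rwa [List.getD_eq_getElem cs ' ' h1] at h0
    have h3' : cs[i + 1] = '"' := by
      have h0 : cs.getD (i + 1) ' ' = '"' := h3.2
      rwa [List.getD_eq_getElem cs ' ' h3.1] at h0
    have hd : (cs.drop (i + 1)).head? = some '"' := by
      rw [List.head?_drop]
      exact List.getElem?_eq_some_iff.mpr ⟨h3.1, h3'⟩
    rw [List.drop_eq_getElem_cons h1]
    simp only [pvQVal, pvQRest, h2', hd, List.tail_drop]
    refine ⟨?_, ih.2⟩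
    rw [ih.1]
    simp
  | case2 i buf h1 ch h2 h3 =>
    -- line[i] = '"', next char is not '"': close the quote
    have h2' : cs[i] = '"' := by
      have h0 : cs.getD i ' ' = '"' := h2
      rwa [List.getD_eq_getElem cs ' ' h1] at h0
    have hd : ¬ (cs.drop (i + 1)).head? = some '"' := by
      rw [List.head?_drop]
      intro hc
      obtain ⟨hlt, hv⟩ := List.getElem?_eq_some_iff.mp hc
      exact h3 ⟨hlt, by rwa [List.getD_eq_getElem cs ' ' hlt]⟩
    rw [List.drop_eq_getElem_cons h1]
    simp only [pvQVal, pvQRest, h2', if_neg hd, List.tail_drop]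
    simp
  | case3 i buf h1 ch h2 ih =>
    have h2' : ¬ cs[i] = '"' := by
      intro hc
      exact h2 (show cs.getD i ' ' = '"' by rwa [List.getD_eq_getElem cs ' ' h1])
    have hch : ch = cs[i] := List.getD_eq_getElem cs ' ' h1
    rw [List.drop_eq_getElem_cons h1]
    simp only [pvQVal, pvQRest, if_neg h2', List.tail_drop, hch]
    simp only [hch] at ih
    refine ⟨?_, ih.2⟩
    rw [ih.1]
    simp
  | case4 i buf h1 =>
    rw [List.drop_eq_nil_iff.mpr (by omega)]
    simp [pvQVal, pvQRest]

theorem pv_qval_append (t x : List Char) (h : ∀ c ∈ t, ¬ c = '"') :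
    pvQVal (t ++ x) = t ++ pvQVal x := by
  induction t with
  | nil => rfl
  | cons c r ih =>
    have hc : ¬ c = '"' := h c (by simp)
    simp only [List.cons_append, pvQVal, if_neg hc]
    rw [ih (fun d hd => h d (by simp [hd]))]

theorem pv_qrest_append (t x : List Char) (h : ∀ c ∈ t, ¬ c = '"') :
    pvQRest (t ++ x) = pvQRest x := by
  induction t with
  | nil => rfl
  | cons c r ih =>
    have hc : ¬ c = '"' := h c (by simp)
    simp only [List.cons_append, pvQRest, if_neg hc]
    exact ih (fun d hd => h d (by simp [hd]))

theorem pv_startswith_head (l : List Char) (c : Char) :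
    PySem.Chars.startswith l [c] = true ↔ l.head? = some c := by
  rw [PySem.Chars.startswith_iff, pv_singleton_prefix]

theorem pv_quotB_eq (rest : List Char) (pieces : List (List Char)) :
    pvQuotB rest pieces = (pieces.flatten ++ pvQVal rest, pvQRest rest) := by
  fun_induction pvQuotB rest pieces with
  | case1 rest pieces p pieces' h =>
    have hpdef : p = pvPartB '"' rest := rfl
    have hp2def : pieces' = pieces ++ [p.1] := rfl
    have hp := pvPartB_eq '"' rest
    have ht : ∀ c ∈ rest.takeWhile (fun c => decide (c ≠ '"')), ¬ c = '"' := by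
      intro c hc; simpa using List.mem_takeWhile_imp hc
    rw [hp2def, hpdef, hp]
    simp only []
    rw [hpdef, hp] at h
    simp only [] at h
    by_cases hm : '"' ∈ rest
    · obtain ⟨r2, hr⟩ := pv_dropWhile_mem '"' rest hm
      have hsw : ¬ r2.head? = some '"' := by
        rcases h with h | h
        · simp [hm] at h
        · rw [hr] at h
          simp only [List.tail_cons] at h
          exact fun hc => h ((pv_startswith_head r2 '"').mpr hc)
      have hval : pvQVal rest = rest.takeWhile (fun c => decide (c ≠ '"')) := by
        conv_lhs => rw [← List.takeWhile_append_dropWhile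
          (p := fun c => decide (c ≠ '"')) (l := rest), hr]
        rw [pv_qval_append _ _ ht]
        simp [pvQVal, hsw]
      have hrst : pvQRest rest = r2 := by
        conv_lhs => rw [← List.takeWhile_append_dropWhile
          (p := fun c => decide (c ≠ '"')) (l := rest), hr]
        rw [pv_qrest_append _ _ ht]
        simp [pvQRest, hsw]
      rw [hval, hrst, hr]
      simp
    · have hall : ∀ x ∈ rest, ¬ x = '"' := fun x hx he => hm (he ▸ hx)
      have hdw : rest.dropWhile (fun c => decide (c ≠ '"')) = [] := by
        rw [List.dropWhile_eq_nil_iff]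
        intro x hx; simpa using hall x hx
      have htw : rest.takeWhile (fun c => decide (c ≠ '"')) = rest := by
        rw [List.takeWhile_eq_self_iff]
        intro x hx; simpa using hall x hx
      have hval : pvQVal rest = rest := by
        conv_lhs => rw [← List.append_nil rest]
        rw [pv_qval_append _ _ hall]
        simp [pvQVal]
      have hrst : pvQRest rest = [] := by
        conv_lhs => rw [← List.append_nil rest]
        rw [pv_qrest_append _ _ hall]
        simp [pvQRest]
      rw [hval, hrst, hdw, htw]
      simp
  | case2 rest pieces p pieces' h ih =>
    have hpdef : p = pvPartB '"' rest := rfl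
    have hp2def : pieces' = pieces ++ [p.1] := rfl
    have hp := pvPartB_eq '"' rest
    have ht : ∀ c ∈ rest.takeWhile (fun c => decide (c ≠ '"')), ¬ c = '"' := by
      intro c hc; simpa using List.mem_takeWhile_imp hc
    rw [not_or, not_not] at h
    obtain ⟨hq, hsw⟩ := h
    rw [hpdef, hp] at hq hsw
    simp only [] at hq hsw
    have hm : '"' ∈ rest := by simpa using hq
    obtain ⟨r2, hr⟩ := pv_dropWhile_mem '"' rest hm
    rw [hr] at hsw
    simp only [List.tail_cons] at hsw
    obtain ⟨r3, hr3⟩ : ∃ r3, r2 = '"' :: r3 := by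
      rcases r2 with _ | ⟨c, r3⟩
      · rw [pv_startswith_head] at hsw; simp at hsw
      · rw [pv_startswith_head] at hsw
        simp at hsw
        exact ⟨r3, by rw [hsw]⟩
    have hval : pvQVal rest = rest.takeWhile (fun c => decide (c ≠ '"')) ++ '"' :: pvQVal r3 := by
      conv_lhs => rw [← List.takeWhile_append_dropWhile
        (p := fun c => decide (c ≠ '"')) (l := rest), hr, hr3]
      rw [pv_qval_append _ _ ht]
      simp [pvQVal]
    have hrst : pvQRest rest = pvQRest r3 := by
      conv_lhs => rw [← List.takeWhile_append_dropWhile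
        (p := fun c => decide (c ≠ '"')) (l := rest), hr, hr3]
      rw [pv_qrest_append _ _ ht]
      simp [pvQRest]
    rw [hp2def, hpdef, hp] at ih ⊢
    simp only [List.tail_cons, hr, hr3] at ih ⊢
    rw [ih, hval, hrst]
    simp

theorem pv_main_eq (cs : List Char) (i : Nat)
    (acc : List (String × String)) : pvMainA cs i acc = pvMainB (cs.drop i) acc := by
  have hlw : ∀ l : List Char, PySem.Chars.lstrip l = l.dropWhile PySem.Chars.isspace :=
    fun l => rfl
  have hl : ∀ k : Nat, PySem.Chars.lstrip (cs.drop k) = cs.drop (pvSkipA cs cs.length k) := by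
    intro k
    rw [hlw, pv_dropWhile_eq_drop, List.drop_drop, pv_skip_eq]
  fun_induction pvMainA cs i acc with
  | case1 i acc i1 h1 j hj =>
    have hjdef : j = PySem.Chars.findFrom cs ['='] (↑i1) none := rfl
    have hfnd := PySem.Chars.findFrom_natCast cs ['='] i1 (le_of_lt h1)
    have hmem : ¬ '=' ∈ cs.drop i1 := by
      intro hm
      rw [pv_find_char, if_pos hm] at hfnd
      rw [hjdef, hfnd] at hj
      split at hj <;> omega
    rw [pvMainB, show PySem.Chars.lstrip (cs.drop i) = cs.drop i1 from hl i]
    rw [pvPartB_eq]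
    simp only []
    rw [if_pos (by simp [hmem])]
  | case2 i acc i1 h1 j hj key i2 hq r ih =>
    have hjdef : j = PySem.Chars.findFrom cs ['='] (↑i1) none := rfl
    have hfnd := PySem.Chars.findFrom_natCast cs ['='] i1 (le_of_lt h1)
    have hmem : '=' ∈ cs.drop i1 := by
      by_contra hm
      rw [pv_find_char, if_neg hm] at hfnd
      simp at hfnd
      rw [hjdef, hfnd] at hj
      omega
    rw [pv_find_char, if_pos hmem] at hfnd
    have hjval : j = ((i1 : Int)) + ((cs.drop i1).takeWhile (fun c => decide (c ≠ '='))).length := by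
      rw [hjdef, hfnd]
      split <;> omega
    have hjt : j.toNat = i1 + ((cs.drop i1).takeWhile (fun c => decide (c ≠ '='))).length := by
      omega
    have hkey : key = (cs.drop i1).takeWhile (fun c => decide (c ≠ '=')) := by
      show PySem.List.slice cs (some ↑i1) (some j) = _
      rw [show j = ((i1 + ((cs.drop i1).takeWhile (fun c => decide (c ≠ '='))).length : Nat) : Int)
        by push_cast; omega]
      rw [PySem.List.slice_natCast]
      rw [show i1 + ((cs.drop i1).takeWhile (fun c => decide (c ≠ '='))).length - i1
        = ((cs.drop i1).takeWhile (fun c => decide (c ≠ '='))).length by omega]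
      exact pv_take_takeWhile _ _
    have hdrop2 : cs.drop i2 = ((cs.drop i1).dropWhile (fun c => decide (c ≠ '='))).tail := by
      rw [pv_dropWhile_eq_drop, List.tail_drop, List.drop_drop]
      show cs.drop (j.toNat + 1) = _
      congr 1
      omega
    have hq' : (cs.drop i2).head? = some '"' := by
      rw [List.head?_drop]
      refine List.getElem?_eq_some_iff.mpr ⟨hq.1, ?_⟩
      have h0 : cs.getD i2 ' ' = '"' := hq.2
      rwa [List.getD_eq_getElem cs ' ' hq.1] at h0
    have hqA := pv_quotedA_eq cs (i2 + 1) []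
    have hrdef : r = pvQuotedA cs cs.length (i2 + 1) [] := rfl
    rw [ih]
    conv_rhs => rw [pvMainB]
    rw [show PySem.Chars.lstrip (cs.drop i) = cs.drop i1 from hl i, pvPartB_eq]
    simp only []
    rw [if_neg (by simp [hmem])]
    rw [if_pos (by rw [pv_startswith_head, ← hdrop2]; exact hq')]
    rw [← hdrop2, List.tail_drop, pv_quotB_eq]
    simp only [List.flatten_nil, List.nil_append]
    rw [show List.drop r.2 cs = pvQRest (cs.drop (i2 + 1)) from by rw [hrdef]; exact hqA.2]
    rw [show r.1 = pvQVal (cs.drop (i2 + 1)) from by rw [hrdef]; simpa using hqA.1]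
    rw [hkey]
  | case3 i acc i1 h1 j hj key i2 hq i3 ih =>
    have hjdef : j = PySem.Chars.findFrom cs ['='] (↑i1) none := rfl
    have hfnd := PySem.Chars.findFrom_natCast cs ['='] i1 (le_of_lt h1)
    have hmem : '=' ∈ cs.drop i1 := by
      by_contra hm
      rw [pv_find_char, if_neg hm] at hfnd
      simp at hfnd
      rw [hjdef, hfnd] at hj
      omega
    rw [pv_find_char, if_pos hmem] at hfnd
    have hjval : j = ((i1 : Int)) + ((cs.drop i1).takeWhile (fun c => decide (c ≠ '='))).length := by
      rw [hjdef, hfnd]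
      split <;> omega
    have hjt : j.toNat = i1 + ((cs.drop i1).takeWhile (fun c => decide (c ≠ '='))).length := by
      omega
    have hkey : key = (cs.drop i1).takeWhile (fun c => decide (c ≠ '=')) := by
      show PySem.List.slice cs (some ↑i1) (some j) = _
      rw [show j = ((i1 + ((cs.drop i1).takeWhile (fun c => decide (c ≠ '='))).length : Nat) : Int)
        by push_cast; omega]
      rw [PySem.List.slice_natCast]
      rw [show i1 + ((cs.drop i1).takeWhile (fun c => decide (c ≠ '='))).length - i1
        = ((cs.drop i1).takeWhile (fun c => decide (c ≠ '='))).length by omega]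
      exact pv_take_takeWhile _ _
    have hdrop2 : cs.drop i2 = ((cs.drop i1).dropWhile (fun c => decide (c ≠ '='))).tail := by
      rw [pv_dropWhile_eq_drop, List.tail_drop, List.drop_drop]
      show cs.drop (j.toNat + 1) = _
      congr 1
      omega
    have hq' : ¬ (cs.drop i2).head? = some '"' := by
      rw [List.head?_drop]
      intro hc
      obtain ⟨hlt, hv⟩ := List.getElem?_eq_some_iff.mp hc
      exact hq ⟨hlt, by rwa [List.getD_eq_getElem cs ' ' hlt]⟩
    have hunq := pv_unq_eq cs i2
    have hval : PySem.List.slice cs (some ↑i2) (some ↑i3)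
        = (cs.drop i2).takeWhile (fun c => !PySem.Chars.isspace c) := by
      rw [show (↑i3 : Int) = ((i2 + ((cs.drop i2).takeWhile (fun c => !PySem.Chars.isspace c)).length : Nat) : Int)
        by rw [show i3 = pvUnqA cs cs.length i2 from rfl, hunq]]
      rw [PySem.List.slice_natCast]
      rw [show i2 + ((cs.drop i2).takeWhile (fun c => !PySem.Chars.isspace c)).length - i2
        = ((cs.drop i2).takeWhile (fun c => !PySem.Chars.isspace c)).length by omega]
      exact pv_take_takeWhile _ _
    have hdrop3 : cs.drop i3 = (cs.drop i2).dropWhile (fun c => !PySem.Chars.isspace c) := by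
      rw [show i3 = pvUnqA cs cs.length i2 from rfl, hunq, pv_dropWhile_eq_drop, ← List.drop_drop]
    rw [ih]
    conv_rhs => rw [pvMainB]
    rw [show PySem.Chars.lstrip (cs.drop i) = cs.drop i1 from hl i, pvPartB_eq]
    simp only []
    rw [if_neg (by simp [hmem])]
    rw [if_neg (by rw [pv_startswith_head, ← hdrop2]; exact hq')]
    rw [← hdrop2, hkey, hdrop3, hval]
  | case4 i acc i1 h1 =>
    have h0 : PySem.Chars.lstrip (cs.drop i) = [] := by
      rw [hl i, List.drop_eq_nil_iff.mpr (by omega)]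
    rw [pvMainB, h0]
    simp [pvPartB]

-- ===== VERDICT (by name: the statement is the Claim_ definition above) =====
theorem iter_kv_tokens_py_spec : Claim_equal_iter_kv_tokens_py := by
  intro line _
  unfold Spec_iter_kv_tokens_py iter_kv_tokens_py iter_kv_tokens_py_alt
  simpa using pv_main_eq line.toList 0 []
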